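-- pv_equiv track=rewrite | github.com/sunnyflyingsky/Chemical_shift | code/dataTransform.py | getThreeAA
-- ===== SOURCE A (Python) =====
-- def getThreeAA(seq:dict):
--     '''
--     三氨基酸滑窗
--     '''
--     relist = []
--
--     Temp = []
--     for reNum,reName in seq.items():
--         if len(Temp)<3:
--             Temp.append(reNum)
--         else:
--             relist.append(Temp.copy())
--             del Temp[0]
--             Temp.append(reNum)
--     relist.append(Temp.copy())
--
--     return relist
-- ===== SOURCE B (Python) =====
-- def getThreeAA(seq: dict):
--     '''
--     Index-based slicing over the precomputed key list instead of a mutable rolling buffer.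
--     '''
--     keys = list(seq)
--     if len(keys) < 3:
--         return [keys]
--     return [keys[i:i + 3] for i in range(len(keys) - 2)]
-- ===== Notes on version B (the rewrite author's own statement) =====
-- stated objective: simpler
-- what changed: Replaces A's mutable rolling 3-buffer (copy/del/append inside the dict loop) with a precomputed key list and index-based slicing keys[i:i+3], with an explicit short-input case.
import Mathlib
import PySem

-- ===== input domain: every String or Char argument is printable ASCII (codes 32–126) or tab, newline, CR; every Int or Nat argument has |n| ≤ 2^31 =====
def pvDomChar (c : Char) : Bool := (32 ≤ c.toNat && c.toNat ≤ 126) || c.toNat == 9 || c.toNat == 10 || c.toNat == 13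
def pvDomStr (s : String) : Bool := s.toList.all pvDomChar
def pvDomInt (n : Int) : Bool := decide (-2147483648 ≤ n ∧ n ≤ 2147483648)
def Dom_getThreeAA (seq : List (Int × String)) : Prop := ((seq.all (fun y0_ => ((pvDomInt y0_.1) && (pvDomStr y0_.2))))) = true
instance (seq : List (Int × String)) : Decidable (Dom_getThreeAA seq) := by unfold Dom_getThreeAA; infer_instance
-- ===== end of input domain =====

-- B replaces A's mutable rolling 3-buffer with index-based slicing over the precomputed key list (simpler decomposition, same O(n) cost).


-- ===== PORT A =====
-- one loop step of A: fill Temp up to 3 keys, then emit Temp and roll it by one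
def pvStepA (st : List (List Int) × List Int) (item : Int × String) : List (List Int) × List Int :=
  if st.2.length < 3 then (st.1, st.2 ++ [item.1])
  else (st.1 ++ [st.2], st.2.tail ++ [item.1])

def getThreeAA (seq : List (Int × String)) : List (List Int) :=
  let st := (PySem.Dict.ofList seq).items.foldl pvStepA ([], [])
  st.1 ++ [st.2]

-- ===== PORT B =====
def getThreeAA_alt (seq : List (Int × String)) : List (List Int) :=
  let keys := (PySem.Dict.ofList seq).keys
  if keys.length < 3 then [keys]
  else (PySem.List.pyRange 0 ((keys.length : Int) - 2) 1).map
        (fun i => PySem.List.slice keys (some i) (some (i + 3)))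

-- ===== PRECONDITION & SPEC =====
def Spec_getThreeAA (seq : List (Int × String)) (out : List (List Int)) : Prop := out = getThreeAA_alt seq
instance (seq : List (Int × String)) (out : List (List Int)) : Decidable (Spec_getThreeAA seq out) := by unfold Spec_getThreeAA; infer_instance

-- ===== CLAIM (what is proved, stated in full; the proofs are below) =====
def Claim_equal_getThreeAA : Prop := ∀ (seq : List (Int × String)), Dom_getThreeAA seq → Spec_getThreeAA seq (getThreeAA seq)

-- ===== LEMMAS AND PROOFS =====
-- abstract description of A's steady-state loop: windows rolled one key at a time
def pvW3 : List Int → List Int → List (List Int)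
  | t, [] => [t]
  | t, k :: ks => t :: pvW3 (t.tail ++ [k]) ks

lemma pvCoreA (items : List (Int × String)) : ∀ (rl : List (List Int)) (t : List Int),
    t.length = 3 →
    (items.foldl pvStepA (rl, t)).1 ++ [(items.foldl pvStepA (rl, t)).2]
      = rl ++ pvW3 t (items.map Prod.fst) := by
  induction items with
  | nil => intro rl t _; simp [pvW3]
  | cons p rest ih =>
    intro rl t ht
    have hstep : pvStepA (rl, t) p = (rl ++ [t], t.tail ++ [p.1]) := by
      simp [pvStepA, ht]
    have hlen : (t.tail ++ [p.1]).length = 3 := by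
      simp [List.length_tail, ht]
    simp only [List.foldl_cons, hstep, ih _ _ hlen, pvW3, List.map_cons]
    simp

lemma pvW3_slices : ∀ ks : List Int, 3 ≤ ks.length →
    pvW3 (ks.take 3) (ks.drop 3)
      = (List.range (ks.length - 2)).map (fun i => (ks.drop i).take 3) := by
  intro ks
  induction ks with
  | nil => simp
  | cons a rest ih =>
    intro h
    rcases rest with _ | ⟨b, _ | ⟨c, rest2⟩⟩ <;> simp at h
    rcases rest2 with _ | ⟨d, rest3⟩
    · simp [pvW3, List.range_one]
    · have hlen : 3 ≤ (b :: c :: d :: rest3).length := by simp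
      have hih := ih hlen
      have hn : (a :: b :: c :: d :: rest3).length - 2
          = ((b :: c :: d :: rest3).length - 2) + 1 := by simp
      rw [hn, List.range_succ_eq_map]
      simp only [List.map_cons, List.map_map]
      have htail : pvW3 (List.take 3 (a :: b :: c :: d :: rest3))
            (List.drop 3 (a :: b :: c :: d :: rest3))
          = [a, b, c] :: pvW3 [b, c, d] rest3 := by
        simp [pvW3]
      rw [htail]
      have h2 : pvW3 [b, c, d] rest3
          = pvW3 ((b :: c :: d :: rest3).take 3) ((b :: c :: d :: rest3).drop 3) := by
        simp
      rw [h2, hih]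
      congr 1

lemma pvAlt_slices (keys : List Int) (h : 3 ≤ keys.length) :
    (PySem.List.pyRange 0 ((keys.length : Int) - 2) 1).map
        (fun i => PySem.List.slice keys (some i) (some (i + 3)))
      = (List.range (keys.length - 2)).map (fun i => (keys.drop i).take 3) := by
  rw [PySem.List.pyRange_one]
  have he : ((keys.length : Int) - 2 - 0).toNat = keys.length - 2 := by omega
  rw [he, List.map_map]
  apply List.map_congr_left
  intro k _
  have : ((0 : Int) + (k : Int)) = ((k : Nat) : Int) := by ring
  simp only [Function.comp, this]
  have h3 : ((k : Nat) : Int) + 3 = ((k : Nat) : Int) + ((3 : Nat) : Int) := by norm_num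
  rw [h3, PySem.List.slice_natCast_add]

-- ===== VERDICT (by name: the statement is the Claim_ definition above) =====
theorem getThreeAA_spec : Claim_equal_getThreeAA := by
  intro seq _
  unfold Spec_getThreeAA getThreeAA getThreeAA_alt
  have hk : (PySem.Dict.ofList seq).keys = (PySem.Dict.ofList seq).items.map Prod.fst := by
    simp [PySem.Dict.keys]
  rcases hitems : (PySem.Dict.ofList seq).items with _ | ⟨x, _ | ⟨y, _ | ⟨z, rest⟩⟩⟩ <;>
    simp only [hk, hitems]
  · simp
  · simp [pvStepA]
  · simp only [List.foldl_cons, List.foldl_nil, pvStepA]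
    simp
  · -- at least three items: three fill steps, then the rolling loop
    have hfill : [x, y, z].foldl pvStepA (([] : List (List Int)), ([] : List Int))
        = ([], [x.1, y.1, z.1]) := by
      simp [pvStepA]
    have hcore := pvCoreA rest [] [x.1, y.1, z.1] (by simp)
    have hA : (List.foldl pvStepA ([], []) (x :: y :: z :: rest)).1
          ++ [(List.foldl pvStepA ([], []) (x :: y :: z :: rest)).2]
        = pvW3 [x.1, y.1, z.1] (rest.map Prod.fst) := by
      have : (x :: y :: z :: rest) = [x, y, z] ++ rest := rfl
      rw [this, List.foldl_append, hfill]
      simp only [List.nil_append] at hcore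
      exact hcore
    set keys := (x :: y :: z :: rest).map Prod.fst with hkeys
    have hklen : 3 ≤ keys.length := by simp [hkeys]
    rw [if_neg (by omega)]
    have hw : pvW3 [x.1, y.1, z.1] (rest.map Prod.fst)
        = pvW3 (keys.take 3) (keys.drop 3) := by simp [hkeys]
    rw [pvAlt_slices keys hklen, hA, hw, pvW3_slices keys hklen]
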